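-- pv_equiv track=rewrite | github.com/psuryo/sharecode | kr-semantic.py | has_property
-- ===== SOURCE A (Python) =====
-- knowledge_base = {
--     "is_a": {
--         "cat": "mammal",
--         "dog": "mammal",
--         "mammal": "animal",
--         "sparrow": "bird",
--         "bird": "animal"
--     },
--     "has_property": {
--         "cat": ["whiskers", "fur"],
--         "dog": ["fur", "barks"],
--         "sparrow": ["feathers", "flies"],
--         "mammal": ["warm_blooded"],
--         "bird": ["warm_blooded", "lays_eggs"]
--     }
-- }
--
-- def has_property(entity, property_name):
--     """Check if an entity has a specific property (directly or inherited)."""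
--     # Check direct properties
--     if entity in knowledge_base["has_property"] and property_name in knowledge_base["has_property"][entity]:
--         return True
--     # Check inherited properties
--     current = entity
--     while current in knowledge_base["is_a"]:
--         parent = knowledge_base["is_a"][current]
--         if parent in knowledge_base["has_property"] and property_name in knowledge_base["has_property"][parent]:
--             return True
--         current = parent
--     return False
-- ===== SOURCE B (Python) =====
-- knowledge_base = {
--     "is_a": {
--         "cat": "mammal",
--         "dog": "mammal",
--         "mammal": "animal",
--         "sparrow": "bird",
--         "bird": "animal"
--     },
--     "has_property": {
--         "cat": ["whiskers", "fur"],
--         "dog": ["fur", "barks"],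
--         "sparrow": ["feathers", "flies"],
--         "mammal": ["warm_blooded"],
--         "bird": ["warm_blooded", "lays_eggs"]
--     }
-- }
--
-- def has_property(entity, property_name):
--     """Check if an entity has a specific property (directly or inherited)."""
--     # Opposite direction to a chain walk: compute the set of ALL entities that
--     # hold the property.  Seed with the direct holders, then propagate each
--     # holder's property down the is_a edges (parent holds => child holds)
--     # until a fixpoint, and finally test the queried entity for membership.
--     holders = [e for e, props in knowledge_base["has_property"].items()
--                if property_name in props]
--     changed = True
--     while changed:
--         changed = False
--         for child, parent in knowledge_base["is_a"].items():
--             if parent in holders and child not in holders: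
--                 holders.append(child)
--                 changed = True
--     return entity in holders
-- ===== Notes on version B (the rewrite author's own statement) =====
-- stated objective: alternative
-- what changed: B reverses the traversal direction: instead of walking the queried entity's ancestor chain, it computes the full set of property holders by seeding with direct holders and propagating the property down all is_a edges to a fixpoint, then answers with one membership test.
import Mathlib
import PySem

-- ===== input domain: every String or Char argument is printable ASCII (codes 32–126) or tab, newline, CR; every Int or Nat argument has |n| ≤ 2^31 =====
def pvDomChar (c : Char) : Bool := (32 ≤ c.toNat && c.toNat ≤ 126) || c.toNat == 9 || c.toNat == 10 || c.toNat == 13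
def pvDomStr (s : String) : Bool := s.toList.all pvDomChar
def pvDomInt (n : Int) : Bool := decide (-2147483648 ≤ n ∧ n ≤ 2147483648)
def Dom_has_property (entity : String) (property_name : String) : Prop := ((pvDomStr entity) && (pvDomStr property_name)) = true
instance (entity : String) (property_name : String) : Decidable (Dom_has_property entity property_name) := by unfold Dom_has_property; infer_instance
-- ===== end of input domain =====

-- B reverses the traversal: it computes the set of all holders of the property by
-- propagating direct holders down the is_a edges to a fixpoint, then tests membership.

-- the module-level knowledge_base (shared literal data, used by both ports)
def kbIsA : PySem.Dict String String :=
  PySem.Dict.mk [("cat", "mammal"), ("dog", "mammal"), ("mammal", "animal"),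
                     ("sparrow", "bird"), ("bird", "animal")]

def kbProps : PySem.Dict String (List String) :=
  PySem.Dict.mk [("cat", ["whiskers", "fur"]), ("dog", ["fur", "barks"]),
                     ("sparrow", ["feathers", "flies"]), ("mammal", ["warm_blooded"]),
                     ("bird", ["warm_blooded", "lays_eggs"])]

-- rank: proof-only measure for A's while loop (the fixed is_a dict is acyclic; each link strictly lowers rank)
def kbRank (s : String) : Nat :=
  if s = "cat" ∨ s = "dog" ∨ s = "sparrow" then 2
  else if s = "mammal" ∨ s = "bird" then 1
  else 0

theorem kbIsA_get?_cases {s p : String} (h : kbIsA.get? s = some p) :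
    (s = "cat" ∧ p = "mammal") ∨ (s = "dog" ∧ p = "mammal") ∨ (s = "mammal" ∧ p = "animal") ∨
    (s = "sparrow" ∧ p = "bird") ∨ (s = "bird" ∧ p = "animal") := by
  unfold kbIsA at h
  rw [PySem.Dict.get?_mk_cons] at h
  by_cases h1 : ("cat" : String) == s
  · simp_all [beq_iff_eq]
  rw [if_neg h1, PySem.Dict.get?_mk_cons] at h
  by_cases h2 : ("dog" : String) == s
  · simp_all [beq_iff_eq]
  rw [if_neg h2, PySem.Dict.get?_mk_cons] at h
  by_cases h3 : ("mammal" : String) == s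
  · simp_all [beq_iff_eq]
  rw [if_neg h3, PySem.Dict.get?_mk_cons] at h
  by_cases h4 : ("sparrow" : String) == s
  · simp_all [beq_iff_eq]
  rw [if_neg h4, PySem.Dict.get?_mk_cons] at h
  by_cases h5 : ("bird" : String) == s
  · simp_all [beq_iff_eq]
  rw [if_neg h5] at h
  simp [PySem.Dict.get?] at h

theorem kbIsA_rank {s p : String} (h : kbIsA.get? s = some p) : kbRank p < kbRank s := by
  rcases kbIsA_get?_cases h with ⟨rfl, rfl⟩ | ⟨rfl, rfl⟩ | ⟨rfl, rfl⟩ | ⟨rfl, rfl⟩ | ⟨rfl, rfl⟩ <;> decide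

-- ===== PORT A =====
-- 'entity in d and property_name in d[entity]'
def directHas (name property_name : String) : Bool :=
  match kbProps.get? name with
  | some props => props.contains property_name
  | none => false

-- the while loop of A: follow is_a, testing each parent as it is reached
def aWalk (property_name current : String) : Bool :=
  match h : kbIsA.get? current with
  | none => false
  | some parent =>
      if directHas parent property_name then true
      else aWalk property_name parent
termination_by kbRank current
decreasing_by exact kbIsA_rank h

def has_property (entity : String) (property_name : String) : Bool :=
  if directHas entity property_name then true
  else aWalk property_name entity

-- ===== PORT B =====
-- '[e for e, props in knowledge_base["has_property"].items() if property_name in props]'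
def seedHolders (property_name : String) : List String :=
  ((kbProps.items).filter (fun it => it.2.contains property_name)).map (fun it => it.1)

-- the body of the 'for child, parent' loop; state = (holders, changed)
def stepKB (st : List String × Bool) (it : String × String) : List String × Bool :=
  if st.1.contains it.2 && !(st.1.contains it.1) then (st.1 ++ [it.1], true) else st

-- one 'for child, parent in knowledge_base["is_a"].items()' pass
def propagate (holders : List String) : List String × Bool :=
  (kbIsA.items).foldl stepKB (holders, false)

-- the 'while changed' loop; the fuel only makes it total: each productive pass appends at
-- least one of the 5 distinct is_a children, so 6 passes always reach the fixpoint
def bLoop : Nat → List String → List String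
  | 0, holders => holders
  | fuel + 1, holders =>
      let st := propagate holders
      if st.2 then bLoop fuel st.1 else st.1

def has_property_alt (entity : String) (property_name : String) : Bool :=
  (bLoop ((kbIsA.items).length + 1) (seedHolders property_name)).contains entity

-- ===== PRECONDITION & SPEC =====
def Spec_has_property (entity : String) (property_name : String) (out : Bool) : Prop := out = has_property_alt entity property_name
instance (entity : String) (property_name : String) (out : Bool) : Decidable (Spec_has_property entity property_name out) := by unfold Spec_has_property; infer_instance

-- ===== CLAIM (what is proved, stated in full; the proofs are below) =====
def Claim_equal_has_property : Prop := ∀ (entity : String) (property_name : String), Dom_has_property entity property_name → Spec_has_property entity property_name (has_property entity property_name)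

-- ===== LEMMAS AND PROOFS =====

-- every child key of the is_a dict (= everything a pass can append)
def kbNames : List String := ["cat", "dog", "sparrow", "mammal", "bird"]

-- counting measure for the fixpoint: how many of the 5 names are already holders
def cnt (h : List String) : Nat := kbNames.countP (fun x => h.contains x)

theorem kbIsA_items_child_names : ∀ it ∈ kbIsA.items, it.1 ∈ kbNames := by decide

theorem kbIsA_items_get? : ∀ it ∈ kbIsA.items, kbIsA.get? it.1 = some it.2 := by decide

theorem kbIsA_get?_items {c par : String} (h : kbIsA.get? c = some par) :
    (c, par) ∈ kbIsA.items := by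
  rcases kbIsA_get?_cases h with ⟨rfl, rfl⟩ | ⟨rfl, rfl⟩ | ⟨rfl, rfl⟩ | ⟨rfl, rfl⟩ | ⟨rfl, rfl⟩ <;>
    decide

theorem kbProps_items_get? : ∀ it ∈ kbProps.items, kbProps.get? it.1 = some it.2 := by decide

theorem kbProps_get?_items {s : String} {l : List String} (h : kbProps.get? s = some l) :
    (s, l) ∈ kbProps.items := by
  unfold kbProps at h ⊢
  rw [PySem.Dict.get?_mk_cons] at h
  by_cases h1 : ("cat" : String) == s
  · simp_all [beq_iff_eq, PySem.Dict.items]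
  rw [if_neg h1, PySem.Dict.get?_mk_cons] at h
  by_cases h2 : ("dog" : String) == s
  · simp_all [beq_iff_eq, PySem.Dict.items]
  rw [if_neg h2, PySem.Dict.get?_mk_cons] at h
  by_cases h3 : ("sparrow" : String) == s
  · simp_all [beq_iff_eq, PySem.Dict.items]
  rw [if_neg h3, PySem.Dict.get?_mk_cons] at h
  by_cases h4 : ("mammal" : String) == s
  · simp_all [beq_iff_eq, PySem.Dict.items]
  rw [if_neg h4, PySem.Dict.get?_mk_cons] at h
  by_cases h5 : ("bird" : String) == s
  · simp_all [beq_iff_eq, PySem.Dict.items]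
  rw [if_neg h5] at h
  simp [PySem.Dict.get?] at h

-- membership in the seed list is exactly the direct-property test
theorem seed_iff {x p : String} : x ∈ seedHolders p ↔ directHas x p = true := by
  constructor
  · intro h
    unfold seedHolders at h
    rw [List.mem_map] at h
    obtain ⟨it, hit, rfl⟩ := h
    rw [List.mem_filter] at hit
    unfold directHas
    rw [kbProps_items_get? it hit.1]
    exact hit.2
  · intro h
    unfold directHas at h
    cases hg : kbProps.get? x with
    | none => rw [hg] at h; cases h
    | some l =>
        rw [hg] at h
        unfold seedHolders
        rw [List.mem_map]
        exact ⟨(x, l), List.mem_filter.2 ⟨kbProps_get?_items hg, h⟩, rfl⟩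

-- fold-shape lemmas for one propagation pass -------------------------------------------------

theorem foldl_step_prefix (l : List (String × String)) (h : List String) (b : Bool) :
    ∃ ext, (l.foldl stepKB (h, b)).1 = h ++ ext := by
  induction l generalizing h b with
  | nil => exact ⟨[], by simp⟩
  | cons it t ih =>
      simp only [List.foldl_cons, stepKB]
      split_ifs with hc
      · obtain ⟨e, he⟩ := ih (h ++ [it.1]) true
        exact ⟨it.1 :: e, by simp [he]⟩
      · exact ih h b

theorem foldl_step_flag (l : List (String × String)) (h : List String) :
    (l.foldl stepKB (h, true)).2 = true := by
  induction l generalizing h with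
  | nil => rfl
  | cons it t ih =>
      simp only [List.foldl_cons, stepKB]
      split_ifs with hc
      · exact ih (h ++ [it.1])
      · exact ih h

theorem foldl_step_fix (l : List (String × String)) (h : List String)
    (hf : (l.foldl stepKB (h, false)).2 = false) :
    (l.foldl stepKB (h, false)).1 = h ∧ ∀ it ∈ l, it.2 ∈ h → it.1 ∈ h := by
  induction l generalizing h with
  | nil => exact ⟨rfl, by simp⟩
  | cons it t ih =>
      simp only [List.foldl_cons, stepKB] at hf ⊢
      split_ifs at hf ⊢ with hc
      · rw [foldl_step_flag] at hf; cases hf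
      · obtain ⟨h1, h2⟩ := ih h hf
        refine ⟨h1, ?_⟩
        intro it' hit' hmem
        rcases List.mem_cons.1 hit' with rfl | hit'
        · simp only [Bool.and_eq_true, Bool.not_eq_eq_eq_not, Bool.not_true,
            List.contains_eq_mem, decide_eq_true_eq, decide_eq_false_iff_not, not_and,
            not_not] at hc
          exact hc hmem
        · exact h2 it' hit' hmem

theorem foldl_step_sound (P : String → Prop) (l : List (String × String)) (h : List String)
    (b : Bool) (hedge : ∀ it ∈ l, P it.2 → P it.1) (hinit : ∀ x ∈ h, P x) :
    ∀ x ∈ (l.foldl stepKB (h, b)).1, P x := by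
  induction l generalizing h b with
  | nil => exact hinit
  | cons it t ih =>
      simp only [List.foldl_cons, stepKB]
      split_ifs with hc
      · refine ih (h ++ [it.1]) true (fun it' hit' => hedge it' (List.mem_cons_of_mem _ hit')) ?_
        intro x hx
        rcases List.mem_append.1 hx with hx | hx
        · exact hinit x hx
        · rw [List.mem_singleton] at hx
          subst hx
          simp only [Bool.and_eq_true, List.contains_eq_mem, decide_eq_true_eq] at hc
          exact hedge it List.mem_cons_self (hinit it.2 hc.1)
      · exact ih h b (fun it' hit' => hedge it' (List.mem_cons_of_mem _ hit')) hinit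

-- counting lemmas ---------------------------------------------------------------------------

theorem cnt_le_five (h : List String) : cnt h ≤ 5 := by
  unfold cnt
  exact le_trans List.countP_le_length (by decide)

theorem cnt_mono_append (h e : List String) : cnt h ≤ cnt (h ++ e) := by
  unfold cnt
  refine List.countP_mono_left ?_
  intro x _ hx
  simp only [List.contains_eq_mem, decide_eq_true_eq, List.mem_append] at hx ⊢
  exact Or.inl hx

theorem countP_lt_countP {α : Type} (l : List α) (p q : α → Bool)
    (hpq : ∀ a ∈ l, p a = true → q a = true) (a : α) (ha : a ∈ l)
    (hpa : p a = false) (hqa : q a = true) : l.countP p < l.countP q := by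
  induction l with
  | nil => cases ha
  | cons x t ih =>
      rcases List.mem_cons.1 ha with rfl | ha
      · rw [List.countP_cons, List.countP_cons, hpa, hqa]
        simp only [if_true, Bool.false_eq_true, if_false, add_zero]
        have := List.countP_mono_left (l := t)
          (fun b hb hp => hpq b (List.mem_cons_of_mem _ hb) hp)
        omega
      · rw [List.countP_cons, List.countP_cons]
        have h1 := ih (fun b hb hp => hpq b (List.mem_cons_of_mem _ hb) hp) ha
        have h2 : (if p x = true then 1 else 0) ≤ (if q x = true then 1 else 0) := by
          split_ifs with hp hq
          · omega
          · exact absurd (hpq x List.mem_cons_self hp) hq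
          · omega
          · omega
        omega

theorem cnt_lt_append {h : List String} {x : String} (hx : x ∈ kbNames) (hnx : x ∉ h) :
    cnt h < cnt (h ++ [x]) := by
  unfold cnt
  refine countP_lt_countP _ _ _ ?_ x hx ?_ ?_
  · intro a _ ha
    simp only [List.contains_eq_mem, decide_eq_true_eq, List.mem_append] at ha ⊢
    exact Or.inl ha
  · simp only [List.contains_eq_mem, decide_eq_false_iff_not]
    exact hnx
  · simp [List.contains_eq_mem]

theorem foldl_step_grow (l : List (String × String)) (h : List String)
    (hn : ∀ it ∈ l, it.1 ∈ kbNames) (hf : (l.foldl stepKB (h, false)).2 = true) :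
    cnt h < cnt (l.foldl stepKB (h, false)).1 := by
  induction l generalizing h with
  | nil => cases hf
  | cons it t ih =>
      simp only [List.foldl_cons, stepKB] at hf ⊢
      split_ifs at hf ⊢ with hc
      · obtain ⟨e, he⟩ := foldl_step_prefix t (h ++ [it.1]) true
        rw [he]
        have h1 : cnt h < cnt (h ++ [it.1]) := by
          refine cnt_lt_append (hn it List.mem_cons_self) ?_
          simp only [Bool.and_eq_true, Bool.not_eq_eq_eq_not, Bool.not_true,
            List.contains_eq_mem, decide_eq_false_iff_not] at hc
          exact hc.2
        have h2 := cnt_mono_append (h ++ [it.1]) e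
        omega
      · exact ih h (fun it' hit' => hn it' (List.mem_cons_of_mem _ hit')) hf

-- bLoop lemmas ------------------------------------------------------------------------------

theorem bLoop_sub (n : Nat) (h : List String) : ∀ x ∈ h, x ∈ bLoop n h := by
  induction n generalizing h with
  | zero => exact fun x hx => hx
  | succ n ih =>
      intro x hx
      unfold bLoop
      obtain ⟨e, he⟩ := foldl_step_prefix (kbIsA.items) h false
      have hx' : x ∈ (propagate h).1 := by
        unfold propagate
        rw [he]
        exact List.mem_append.2 (Or.inl hx)
      dsimp only
      split_ifs with hflag
      · exact ih (propagate h).1 x hx'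
      · exact hx'

theorem bLoop_sound (P : String → Prop) (hedge : ∀ it ∈ kbIsA.items, P it.2 → P it.1)
    (n : Nat) (h : List String) (hinit : ∀ x ∈ h, P x) : ∀ x ∈ bLoop n h, P x := by
  induction n generalizing h with
  | zero => exact hinit
  | succ n ih =>
      unfold bLoop
      dsimp only
      split_ifs with hflag
      · exact ih (propagate h).1 (foldl_step_sound P _ h false hedge hinit)
      · exact foldl_step_sound P _ h false hedge hinit

theorem bLoop_fix (n : Nat) (h : List String) (hcnt : 5 < cnt h + n) :
    ∀ it ∈ kbIsA.items, it.2 ∈ bLoop n h → it.1 ∈ bLoop n h := by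
  induction n generalizing h with
  | zero =>
      exfalso
      have := cnt_le_five h
      omega
  | succ n ih =>
      unfold bLoop
      dsimp only
      split_ifs with hflag
      · refine ih (propagate h).1 ?_
        have := foldl_step_grow (kbIsA.items) h kbIsA_items_child_names hflag
        unfold propagate
        omega
      · have hflag' : (kbIsA.items.foldl stepKB (h, false)).2 = false := by
          simp only [Bool.not_eq_true] at hflag
          exact hflag
        obtain ⟨h1, h2⟩ := foldl_step_fix (kbIsA.items) h hflag'
        have h1' : (propagate h).1 = h := h1
        intro it hit hmem
        rw [h1'] at hmem ⊢
        exact h2 it hit hmem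

-- A's walk always lands inside B's fixpoint (induction on the acyclicity rank)
theorem aWalk_mem_aux (p : String) : ∀ (k : Nat) (c : String), kbRank c < k →
    aWalk p c = true → c ∈ bLoop ((kbIsA.items).length + 1) (seedHolders p) := by
  intro k
  induction k with
  | zero => intro c hk _; omega
  | succ k ih =>
      intro c hk hw
      rw [aWalk] at hw
      split at hw
      · cases hw
      · rename_i parent hg
        have hfix := bLoop_fix ((kbIsA.items).length + 1) (seedHolders p)
          (by
            have h5 : (kbIsA.items).length = 5 := by decide
            omega)
        refine hfix (c, parent) (kbIsA_get?_items hg) ?_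
        split_ifs at hw with hd
        · exact bLoop_sub _ _ parent (seed_iff.2 hd)
        · exact ih parent (by have := kbIsA_rank hg; omega) hw

theorem aWalk_mem (p c : String) (hw : aWalk p c = true) :
    c ∈ bLoop ((kbIsA.items).length + 1) (seedHolders p) :=
  aWalk_mem_aux p (kbRank c + 1) c (by omega) hw

-- the central characterisation: A answers true exactly on B's fixpoint
theorem main_iff (e p : String) :
    has_property e p = true ↔ e ∈ bLoop ((kbIsA.items).length + 1) (seedHolders p) := by
  constructor
  · intro hA
    unfold has_property at hA
    split_ifs at hA with hd
    · exact bLoop_sub _ _ e (seed_iff.2 hd)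
    · exact aWalk_mem p e hA
  · intro hB
    refine bLoop_sound (fun x => has_property x p = true) ?_ _ _ ?_ e hB
    · intro it hit hP
      unfold has_property at hP ⊢
      split_ifs with hd
      · rfl
      · rw [aWalk]
        split
        · rename_i hg
          rw [kbIsA_items_get? it hit] at hg
          cases hg
        · rename_i parent hg
          rw [kbIsA_items_get? it hit] at hg
          injection hg with hg
          subst hg
          split_ifs at hP with hd2
          · rw [if_pos hd2]
          · rw [if_neg hd2]
            exact hP
    · intro x hx
      unfold has_property
      rw [if_pos (seed_iff.1 hx)]

-- ===== VERDICT (by name: the statement is the Claim_ definition above) =====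
theorem has_property_spec : Claim_equal_has_property := by
  intro e p _
  unfold Spec_has_property has_property_alt
  cases hA : has_property e p with
  | true =>
      have := main_iff e p |>.1 hA
      simp [List.contains_eq_mem, this]
  | false =>
      cases hB : (bLoop ((kbIsA.items).length + 1) (seedHolders p)).contains e with
      | false => rfl
      | true =>
          exfalso
          rw [List.contains_eq_mem, decide_eq_true_eq] at hB
          rw [(main_iff e p).2 hB] at hA
          cases hA
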